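-- pv_equiv track=rewrite | github.com/evanSpendlove/AdventOfCode | day_8/day8_improved.py | computeExitingIterative
-- ===== SOURCE A (Python) =====
-- def parseNumber(line) -> int:
--     sign = 1 if "+" in line else -1
--     number = int(line[5:])
--     return number * sign
--
-- def simulateLine(idx, program):
--     line = program[idx].strip()
--     return idx + 1 if "jmp" not in line else idx + parseNumber(line)
--
-- def computeExitingIterative(program):
--     exiting = [None for i in range(len(program))]
--     for i in range(len(program)):
--         cycleResult = []
--         lineIdx = i
--         while len(cycleResult) is 0:
--             if lineIdx >= len(program):
--                 cycleResult.append(1)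
--                 break
--             if exiting[lineIdx] is not None:
--                 if len(exiting[lineIdx]) is 0:
--                     exiting[lineIdx] = cycleResult
--                     cycleResult.append(-1)
--                     break
--                 if len(exiting[lineIdx]) > 0:
--                     cycleResult.append(exiting[lineIdx][0])
--                     break
--             exiting[lineIdx] = cycleResult
--             lineIdx = simulateLine(lineIdx, program)
--     return [i[0] for i in exiting]
-- ===== SOURCE B (Python) =====
-- def parseNumber(line) -> int:
--     sign = 1 if "+" in line else -1
--     number = int(line[5:])
--     return number * sign
--
-- def simulateLine(idx, program):
--     line = program[idx].strip()
--     return idx + 1 if "jmp" not in line else idx + parseNumber(line)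
--
-- def computeExitingIterative(program):
--     result = []
--     for i in range(len(program)):
--         visited = set()
--         pos = i
--         while True:
--             if pos >= len(program):
--                 result.append(1)
--                 break
--             if pos in visited:
--                 result.append(-1)
--                 break
--             visited.add(pos)
--             pos = simulateLine(pos, program)
--     return result
-- ===== Notes on version B (the rewrite author's own statement) =====
-- stated objective: simpler
-- what changed: B replaces A's cross-iteration memo array of aliased mutable lists (shared empty cycleResult lists resolved by a single append) with an independent per-start simulation using a plain local visited set, appending 1 on exit and -1 on revisit.
-- outside the precondition, e.g. on computeExitingIterative(['jmp -1', 'abc']): A returns [-1, -1], B returns [-1, 1]; on computeExitingIterative(['jmp -1']): A returns [-1], B raises IndexError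
import Mathlib
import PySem

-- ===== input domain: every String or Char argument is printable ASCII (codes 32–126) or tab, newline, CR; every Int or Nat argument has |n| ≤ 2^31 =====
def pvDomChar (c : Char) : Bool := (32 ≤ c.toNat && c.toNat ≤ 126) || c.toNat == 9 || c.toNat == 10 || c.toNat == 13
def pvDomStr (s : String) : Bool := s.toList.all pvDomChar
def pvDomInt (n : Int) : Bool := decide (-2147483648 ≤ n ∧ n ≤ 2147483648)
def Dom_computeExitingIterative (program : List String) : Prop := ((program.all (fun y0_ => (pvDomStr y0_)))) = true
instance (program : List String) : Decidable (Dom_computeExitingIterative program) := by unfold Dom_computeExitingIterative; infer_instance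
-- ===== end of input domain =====

-- B replaces A's memo array of aliased mutable lists by an independent per-start simulation
-- with a local visited set (objective: simpler).  Equivalence is about the RETURN value.

-- ===== PORT A =====
def parseNumber (line : String) : Int :=
  let sign : Int := if PySem.Str.isIn "+" line then 1 else -1
  -- int(line[5:]): none = ValueError, excluded by Pre_; .getD 0 is never read inside Pre_
  let number : Int := (PySem.Int.ofStr? (PySem.Str.slice line (some 5) none)).getD 0
  number * sign

def simulateLine (idx : Int) (program : List String) : Int :=
  -- program[idx]: negative wrap per Python; none = IndexError, excluded by Pre_
  let line := PySem.Str.strip ((PySem.List.pyGet? program idx).getD "")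
  if !(PySem.Str.isIn "jmp" line) then idx + 1 else idx + parseNumber line

-- A's slots: `none` = Python None, `some none` = an (aliased) still-empty cycleResult list,
-- `some (some v)` = the one-element list [v].  Appending v to the shared cycleResult makes every
-- slot aliased to it become [v] at once; `pvResolve` is exactly that shared-list append.
def pvResolve (exiting : List (Option (Option Int))) (v : Int) : List (Option (Option Int)) :=
  exiting.map (fun s => if s = some none then some (some v) else s)

-- the body of A's while-loop; fuel only makes the loop total (unreachable inside Pre_)
def aWalk (program : List String) (exiting : List (Option (Option Int))) (lineIdx : Int)
    (fuel : Nat) : List (Option (Option Int)) :=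
  match fuel with
  | 0 => exiting
  | fuel + 1 =>
    if (program.length : Int) ≤ lineIdx then pvResolve exiting 1    -- cycleResult.append(1)
    else
      match PySem.List.pyGet? exiting lineIdx with
      | none => exiting                                             -- IndexError, outside Pre_
      | some (some none) => pvResolve exiting (-1)                  -- revisit of an empty list
      | some (some (some v)) => pvResolve exiting v                 -- memoised value
      | some none =>                                                -- exiting[lineIdx] = cycleResult
          aWalk program (PySem.List.pySetD exiting lineIdx (some none))
            (simulateLine lineIdx program) fuel

def computeExitingIterative (program : List String) : List Int :=
  let exiting0 : List (Option (Option Int)) :=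
    (PySem.List.pyRange 0 program.length 1).map (fun _ => none)
  let exiting :=
    (PySem.List.pyRange 0 program.length 1).foldl
      (fun e i => aWalk program e i (program.length + 1)) exiting0
  -- [i[0] for i in exiting]; a None or empty slot would raise, unreachable inside Pre_
  exiting.map (fun s => match s with | some (some v) => v | _ => 0)

-- ===== PORT B =====
def bWalk (program : List String) (visited : PySem.Set Int) (pos : Int) (fuel : Nat) : Int :=
  match fuel with
  | 0 => 0                                                          -- fuel-out, unreachable inside Pre_
  | fuel + 1 =>
    if (program.length : Int) ≤ pos then 1
    else if PySem.Set.contains visited pos then -1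
    else bWalk program (PySem.Set.add visited pos) (simulateLine pos program) fuel

def computeExitingIterative_alt (program : List String) : List Int :=
  (PySem.List.pyRange 0 program.length 1).foldl
    (fun acc i => acc ++ [bWalk program PySem.Set.empty i (program.length + 1)]) []

-- ===== PRECONDITION & SPEC =====
-- successor offset of one line: some d with next-index = idx + d, none where int() raises ValueError
def lineDelta (line : String) : Option Int :=
  let s := PySem.Str.strip line
  if PySem.Str.isIn "jmp" s then
    (PySem.Int.ofStr? (PySem.Str.slice s (some 5) none)).map
      (fun d => if PySem.Str.isIn "+" s then d else -d)
  else some 1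

-- Pre_ excludes programs where some reachable jmp line makes int() raise ValueError, and programs
-- where a jmp can target a negative index: there Python's negative-index wraparound aliases A's
-- memo slots across distinct raw positions, making A's values accidental, and B's own simulation
-- can itself raise IndexError (program[pos] with pos < -len).
def Pre_computeExitingIterative (program : List String) : Prop :=
  ∀ p ∈ program.zipIdx,
    ((lineDelta p.1).any (fun d => decide (0 ≤ (p.2 : Int) + d))) = true
instance (program : List String) : Decidable (Pre_computeExitingIterative program) := by
  unfold Pre_computeExitingIterative; infer_instance

def pvWitness_computeExitingIterative : List String := ["jmp +2", "acc +1", "jmp -2", "nop +0"]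

def Spec_computeExitingIterative (program : List String) (out : List Int) : Prop := out = computeExitingIterative_alt program
instance (program : List String) (out : List Int) : Decidable (Spec_computeExitingIterative program out) := by unfold Spec_computeExitingIterative; infer_instance

-- ===== CLAIM (what is proved, stated in full; the proofs are below) =====
def Claim_equal_computeExitingIterative : Prop := ∀ (program : List String), Dom_computeExitingIterative program → Pre_computeExitingIterative program → Spec_computeExitingIterative program (computeExitingIterative program)

-- ===== LEMMAS AND PROOFS =====

-- the step function of the program graph (junk outside [0, n), where it is the identity)
def F (program : List String) (p : Int) : Int :=
  if 0 ≤ p ∧ p < program.length then p + (lineDelta (program.getD p.toNat "")).getD 1 else p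

def Exits (program : List String) (p : Int) : Prop :=
  ∃ k, (program.length : Int) ≤ (F program)^[k] p

def OutP (program : List String) (p : Int) (v : Int) : Prop :=
  (Exits program p ∧ v = 1) ∨ (¬ Exits program p ∧ v = -1)

theorem OutP_func {program : List String} {p v w : Int}
    (hv : OutP program p v) (hw : OutP program p w) : v = w := by
  rcases hv with ⟨_, rfl⟩ | ⟨h, rfl⟩ <;> rcases hw with ⟨h', rfl⟩ | ⟨h', rfl⟩ <;> tauto

theorem F_fix {program : List String} {p : Int}
    (h : ¬ (0 ≤ p ∧ p < program.length)) : F program p = p := by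
  simp [F, h]

theorem exits_iff_F {program : List String} {p : Int} :
    Exits program p ↔ Exits program (F program p) := by
  constructor
  · rintro ⟨k, hk⟩
    by_cases hp : 0 ≤ p ∧ p < program.length
    · match k, hk with
      | 0, hk => exact absurd hk (by push Not; exact hp.2)
      | k + 1, hk => exact ⟨k, by rwa [Function.iterate_succ_apply] at hk⟩
    · rw [F_fix hp]; exact ⟨k, hk⟩
  · rintro ⟨k, hk⟩
    exact ⟨k + 1, by rwa [Function.iterate_succ_apply]⟩

theorem exits_stuck {program : List String} {p : Int} {j l : Nat}
    (h : (program.length : Int) ≤ (F program)^[j] p) (hjl : j ≤ l) :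
    (F program)^[l] p = (F program)^[j] p := by
  induction l, hjl using Nat.le_induction with
  | base => rfl
  | succ l hl ih =>
    rw [Function.iterate_succ_apply', ih, F_fix]
    rw [ih] at *
    push Not
    intro _
    omega

theorem not_exits_of_cycle {program : List String} {p : Int} {m : Nat}
    (hm : 1 ≤ m) (hc : (F program)^[m] p = p) (hp : p < program.length) :
    ¬ Exits program p := by
  rintro ⟨j, hj⟩
  have hq : (F program)^[m * (j + 1)] p = p := by
    rw [Function.iterate_mul]; exact Function.iterate_fixed hc _
  have hjl : j ≤ m * (j + 1) := by nlinarith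
  have := exits_stuck hj hjl
  rw [hq] at this
  omega

theorem simulateLine_eq_F {program : List String}
    (hpre : Pre_computeExitingIterative program) {p : Int}
    (h0 : 0 ≤ p) (hn : p < program.length) :
    simulateLine p program = F program p ∧ 0 ≤ F program p := by
  have hlt : p.toNat < program.length := by omega
  have hmem : (program[p.toNat], p.toNat) ∈ program.zipIdx := by
    rw [List.mk_mem_zipIdx_iff_getElem?]; simp [hlt]
  have hp := hpre _ hmem
  rcases hld : lineDelta program[p.toNat] with _ | d
  · rw [hld] at hp; simp [Option.any] at hp
  · rw [hld] at hp; simp only [Option.any, decide_eq_true_eq] at hp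
    have hF : F program p = p + d := by
      simp only [F, if_pos (And.intro h0 hn)]
      rw [List.getD_eq_getElem _ _ hlt, hld]; rfl
    refine ⟨?_, by rw [hF]; omega⟩
    rw [hF]
    simp only [simulateLine, PySem.List.pyGet?_eq_some_getElem program h0 hn, Option.getD_some]
    revert hld
    simp only [lineDelta]
    by_cases hj : PySem.Str.isIn "jmp" (PySem.Str.strip program[p.toNat]) = true
    · simp only [hj, if_true, Bool.not_true, Bool.false_eq_true, if_false]
      rcases hoo : PySem.Int.ofStr? (PySem.Str.slice (PySem.Str.strip program[p.toNat]) (some 5) none) with _ | d0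
      · simp
      · simp only [Option.map_some, Option.some.injEq]
        intro hld
        simp only [parseNumber, hoo, Option.getD_some]
        by_cases hplus : PySem.Str.isIn "+" (PySem.Str.strip program[p.toNat]) = true
        · simp only [hplus, if_true] at hld ⊢; omega
        · simp only [hplus, Bool.false_eq_true, if_false] at hld ⊢; omega
    · simp only [Bool.not_eq_true] at hj
      simp only [hj, Bool.false_eq_true, if_false, Bool.not_false, if_true, Option.some.injEq]
      intro hld; omega

theorem int_list_len_le {n : Nat} {l : List Int} (hnd : l.Nodup)
    (hmem : ∀ x ∈ l, 0 ≤ x ∧ x < (n : Int)) : l.length ≤ n := by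
  have hsub : l.toFinset ⊆ Finset.Ico (0 : Int) (n : Int) := by
    intro x hx
    rw [List.mem_toFinset] at hx
    have := hmem x hx
    rw [Finset.mem_Ico]; omega
  have := Finset.card_le_card hsub
  rw [List.toFinset_card_of_nodup hnd] at this
  simpa using this

theorem bWalk_out {program : List String}
    (hpre : Pre_computeExitingIterative program) :
    ∀ (fuel : Nat) (visited : List Int) (pos : Int),
      visited.Nodup →
      (∀ v ∈ visited, 0 ≤ v ∧ v < program.length ∧
          ∃ k, 1 ≤ k ∧ (F program)^[k] v = pos) →
      0 ≤ pos → program.length + 1 ≤ fuel + visited.length →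
      OutP program pos (bWalk program visited pos fuel) := by
  intro fuel
  induction fuel with
  | zero =>
    intro visited pos hnd hreach h0 hfuel
    exfalso
    have := int_list_len_le (n := program.length) hnd
      (fun x hx => ⟨(hreach x hx).1, (hreach x hx).2.1⟩)
    omega
  | succ fuel ih =>
    intro visited pos hnd hreach h0 hfuel
    by_cases hexit : (program.length : Int) ≤ pos
    · simp only [bWalk, if_pos hexit]
      exact Or.inl ⟨⟨0, hexit⟩, rfl⟩
    · by_cases hmem : pos ∈ visited
      · have hc : PySem.Set.contains visited pos = true := by
          rw [PySem.Set.contains_iff]; exact hmem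
        simp only [bWalk, if_neg hexit, hc, if_true]
        obtain ⟨k, hk1, hk⟩ := (hreach pos hmem).2.2
        exact Or.inr ⟨not_exits_of_cycle hk1 hk (by omega), rfl⟩
      · have hc : PySem.Set.contains visited pos = false := by
          rw [← Bool.not_eq_true, PySem.Set.contains_iff]; exact hmem
        have hlt : pos < program.length := by omega
        obtain ⟨hsim, hF0⟩ := simulateLine_eq_F hpre h0 hlt
        have hadd : PySem.Set.add visited pos = visited ++ [pos] := by
          simp only [PySem.Set.add, hc, Bool.false_eq_true, if_false]
        simp only [bWalk, if_neg hexit, hc, Bool.false_eq_true, if_false, hsim, hadd]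
        have hnd' : (visited ++ [pos]).Nodup := by
          refine hnd.append (List.nodup_singleton pos) ?_
          intro a ha hb
          rw [List.mem_singleton] at hb
          exact hmem (hb ▸ ha)
        have hreach' : ∀ v ∈ visited ++ [pos], 0 ≤ v ∧ v < program.length ∧
            ∃ k, 1 ≤ k ∧ (F program)^[k] v = F program pos := by
          intro v hv
          rcases List.mem_append.mp hv with hv | hv
          · obtain ⟨hv0, hvn, k, hk1, hk⟩ := hreach v hv
            exact ⟨hv0, hvn, k + 1, by omega, by
              rw [Function.iterate_succ_apply', hk]⟩
          · rcases List.mem_singleton.mp hv with rfl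
            exact ⟨h0, hlt, 1, le_refl 1, rfl⟩
        have hres := ih (visited ++ [pos]) (F program pos) hnd' hreach' hF0
          (by simp only [List.length_append, List.length_singleton]; omega)
        rcases hres with ⟨he, hv⟩ | ⟨he, hv⟩
        · exact Or.inl ⟨exits_iff_F.mpr he, hv⟩
        · exact Or.inr ⟨fun h => he (exits_iff_F.mp h), hv⟩

-- invariants of A's walk
def GoodE (program : List String) (e : List (Option (Option Int))) : Prop :=
  ∀ (j : Nat) (v : Int), e[j]? = some (some (some v)) → OutP program (j : Int) v

def PendE (program : List String) (e : List (Option (Option Int))) (pos : Int) : Prop :=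
  ∀ (j : Nat), e[j]? = some (some none) → ∃ k, 1 ≤ k ∧ (F program)^[k] (j : Int) = pos

theorem exits_iff_iterate {program : List String} {p : Int} (k : Nat) :
    Exits program p ↔ Exits program ((F program)^[k] p) := by
  induction k with
  | zero => rfl
  | succ k ih => rw [Function.iterate_succ_apply']; exact ih.trans exits_iff_F

theorem OutP_transport {program : List String} {p q v : Int} {k : Nat}
    (hk : (F program)^[k] p = q) (hout : OutP program q v) : OutP program p v := by
  have hiff := exits_iff_iterate (program := program) (p := p) k
  rw [hk] at hiff
  rcases hout with ⟨he, hv⟩ | ⟨he, hv⟩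
  · exact Or.inl ⟨hiff.mpr he, hv⟩
  · exact Or.inr ⟨fun h => he (hiff.mp h), hv⟩

theorem resolve_out {program : List String} {e : List (Option (Option Int))} {pos v : Int}
    (hlen : e.length = program.length) (hgood : GoodE program e)
    (hpend : PendE program e pos) (hout : OutP program pos v) :
    (pvResolve e v).length = program.length ∧ GoodE program (pvResolve e v) ∧
    (∀ (j : Nat), (pvResolve e v)[j]? ≠ some (some none)) ∧
    (∀ (j : Nat) (w : Int), e[j]? = some (some (some w)) →
        (pvResolve e v)[j]? = some (some (some w))) ∧
    (∀ (j : Nat), e[j]? = some (some none) →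
        ∃ w, (pvResolve e v)[j]? = some (some (some w))) := by
  refine ⟨by simpa [pvResolve] using hlen, ?_, ?_, ?_, ?_⟩
  · intro j w hj
    rw [pvResolve, List.getElem?_map] at hj
    rcases hje : e[j]? with _ | (_ | (_ | u)) <;> rw [hje] at hj <;> simp_all
    · obtain ⟨k, _, hk⟩ := hpend j hje
      exact OutP_transport hk hout
    · exact hgood j w hje
  · intro j hj
    rw [pvResolve, List.getElem?_map] at hj
    rcases hje : e[j]? with _ | (_ | (_ | u)) <;> rw [hje] at hj <;> simp_all
  · intro j w hj
    rw [pvResolve, List.getElem?_map, hj]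
    simp
  · intro j hj
    rw [pvResolve, List.getElem?_map, hj]
    exact ⟨v, by simp⟩

theorem aWalk_out {program : List String}
    (hpre : Pre_computeExitingIterative program) :
    ∀ (fuel : Nat) (e : List (Option (Option Int))) (pos : Int),
      e.length = program.length → GoodE program e → PendE program e pos → 0 ≤ pos →
      e.countP (fun s => s = none) + 1 ≤ fuel →
      (aWalk program e pos fuel).length = program.length ∧
      GoodE program (aWalk program e pos fuel) ∧
      (∀ (j : Nat), (aWalk program e pos fuel)[j]? ≠ some (some none)) ∧
      (∀ (j : Nat) (v : Int), e[j]? = some (some (some v)) →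
          (aWalk program e pos fuel)[j]? = some (some (some v))) ∧
      (∀ (j : Nat), e[j]? = some (some none) →
          ∃ v, (aWalk program e pos fuel)[j]? = some (some (some v))) ∧
      (pos < program.length →
          ∃ v, (aWalk program e pos fuel)[pos.toNat]? = some (some (some v))) := by
  intro fuel
  induction fuel with
  | zero => intro e pos _ _ _ _ hfuel; omega
  | succ fuel ih =>
    intro e pos hlen hgood hpend h0 hfuel
    by_cases hexit : (program.length : Int) ≤ pos
    · simp only [aWalk, if_pos hexit]
      obtain ⟨c1, c2, c3, c4, c5⟩ :=
        resolve_out (v := 1) hlen hgood hpend (Or.inl ⟨⟨0, hexit⟩, rfl⟩)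
      exact ⟨c1, c2, c3, c4, c5, fun h => absurd hexit (by omega)⟩
    · have hlt : pos.toNat < e.length := by omega
      have hcast : ((pos.toNat : Nat) : Int) = pos := Int.toNat_of_nonneg h0
      have hget : PySem.List.pyGet? e pos = some (e[pos.toNat]'hlt) :=
        PySem.List.pyGet?_eq_some_getElem e h0 (by omega)
      have hget? : e[pos.toNat]? = some (e[pos.toNat]'hlt) := List.getElem?_eq_getElem hlt
      rcases hslot : e[pos.toNat]'hlt with _ | (_ | v)
      · -- slot is None: mark pending and continue
        rw [hslot] at hget hget?
        simp only [aWalk, if_neg hexit, hget]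
        rw [PySem.List.pySetD_of_nonneg _ _ h0]
        obtain ⟨hsim, hF0⟩ := simulateLine_eq_F hpre h0 (by omega)
        rw [hsim]
        have hlen' : (e.set pos.toNat (some none)).length = program.length := by
          rw [List.length_set]; exact hlen
        have hgood' : GoodE program (e.set pos.toNat (some none)) := by
          intro j w hj
          rw [List.getElem?_set] at hj
          by_cases hij : pos.toNat = j
          · simp [hij] at hj
          · rw [if_neg hij] at hj; exact hgood j w hj
        have hpend' : PendE program (e.set pos.toNat (some none)) (F program pos) := by
          intro j hj
          rw [List.getElem?_set] at hj
          by_cases hij : pos.toNat = j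
          · exact ⟨1, le_refl 1, by rw [Function.iterate_one, ← hij, hcast]⟩
          · rw [if_neg hij] at hj
            obtain ⟨k, hk1, hk⟩ := hpend j hj
            exact ⟨k + 1, by omega, by rw [Function.iterate_succ_apply', hk]⟩
        have hcount : (e.set pos.toNat (some none)).countP (fun s => s = none) + 1 ≤ fuel := by
          rw [List.countP_set hlt]
          have hpos : 0 < e.countP (fun s => decide (s = none)) := by
            rw [List.countP_pos_iff]
            exact ⟨none, hslot ▸ List.getElem_mem hlt, by simp⟩
          simp only [hslot]
          simp only [decide_true, if_true] at *
          simp only [reduceCtorEq, decide_false, Bool.false_eq_true, if_false] at *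
          omega
        obtain ⟨c1, c2, c3, c4, c5, c6⟩ := ih _ _ hlen' hgood' hpend' hF0 hcount
        refine ⟨c1, c2, c3, ?_, ?_, ?_⟩
        · intro j w hj
          have hij : pos.toNat ≠ j := fun h => by
            rw [← h, hget?] at hj; simp at hj
          exact c4 j w (by rw [List.getElem?_set, if_neg hij]; exact hj)
        · intro j hj
          have hij : pos.toNat ≠ j := fun h => by
            rw [← h, hget?] at hj; simp at hj
          exact c5 j (by rw [List.getElem?_set, if_neg hij]; exact hj)
        · intro _
          exact c5 pos.toNat (by rw [List.getElem?_set, if_pos rfl, if_pos hlt])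
      · -- slot is an empty aliased list: loop detected
        rw [hslot] at hget hget?
        simp only [aWalk, if_neg hexit, hget]
        obtain ⟨k, hk1, hk⟩ := hpend pos.toNat hget?
        rw [hcast] at hk
        have hnx : ¬ Exits program pos := not_exits_of_cycle hk1 hk (by omega)
        obtain ⟨c1, c2, c3, c4, c5⟩ :=
          resolve_out (v := -1) hlen hgood hpend (Or.inr ⟨hnx, rfl⟩)
        exact ⟨c1, c2, c3, c4, c5, fun _ => c5 pos.toNat hget?⟩
      · -- slot is a resolved value
        rw [hslot] at hget hget?
        simp only [aWalk, if_neg hexit, hget]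
        have hout : OutP program pos v := by
          have := hgood pos.toNat v hget?
          rwa [hcast] at this
        obtain ⟨c1, c2, c3, c4, c5⟩ := resolve_out hlen hgood hpend hout
        exact ⟨c1, c2, c3, c4, c5, fun _ => ⟨v, c4 pos.toNat v hget?⟩⟩

theorem outer_inv {program : List String}
    (hpre : Pre_computeExitingIterative program) (k : Nat)
    (e : List (Option (Option Int)))
    (hlen : e.length = program.length) (hgood : GoodE program e)
    (hnp : ∀ (j : Nat), e[j]? ≠ some (some none)) :
    ((List.range k).foldl
        (fun e (i : Nat) => aWalk program e (i : Int) (program.length + 1)) e).length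
        = program.length ∧
    GoodE program ((List.range k).foldl
        (fun e (i : Nat) => aWalk program e (i : Int) (program.length + 1)) e) ∧
    (∀ (j : Nat), ((List.range k).foldl
        (fun e (i : Nat) => aWalk program e (i : Int) (program.length + 1)) e)[j]?
        ≠ some (some none)) ∧
    (∀ (j : Nat) (v : Int), e[j]? = some (some (some v)) →
        ((List.range k).foldl
          (fun e (i : Nat) => aWalk program e (i : Int) (program.length + 1)) e)[j]?
          = some (some (some v))) ∧
    (∀ (j : Nat), j < k → j < program.length →
        ∃ v, ((List.range k).foldl
          (fun e (i : Nat) => aWalk program e (i : Int) (program.length + 1)) e)[j]?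
          = some (some (some v))) := by
  induction k with
  | zero =>
    simp only [List.range_zero, List.foldl_nil]
    exact ⟨hlen, hgood, hnp, fun j v h => h, fun j hj _ => absurd hj (by omega)⟩
  | succ k ih =>
    obtain ⟨ihlen, ihgood, ihnp, ihmono, ihdone⟩ := ih
    set e' := (List.range k).foldl
      (fun e (i : Nat) => aWalk program e (i : Int) (program.length + 1)) e with he'
    have hpend : PendE program e' ((k : Nat) : Int) := fun j hj => absurd hj (ihnp j)
    have hcount : e'.countP (fun s => s = none) + 1 ≤ program.length + 1 := by
      have := List.countP_le_length (p := fun s => decide (s = none)) (l := e')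
      omega
    obtain ⟨c1, c2, c3, c4, c5, c6⟩ :=
      aWalk_out hpre (program.length + 1) e' ((k : Nat) : Int) ihlen ihgood hpend
        (by positivity) hcount
    rw [List.range_succ, List.foldl_append, List.foldl_cons, List.foldl_nil, ← he']
    refine ⟨c1, c2, c3, fun j v hj => c4 j v (ihmono j v hj), ?_⟩
    intro j hj hjn
    by_cases hjk : j < k
    · obtain ⟨v, hv⟩ := ihdone j hjk hjn
      exact ⟨v, c4 j v hv⟩
    · have hjeq : j = k := by omega
      subst hjeq
      have := c6 (by exact_mod_cast hjn)
      simpa using this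

-- ===== VERDICT (by name: the statement is the Claim_ definition above) =====
theorem computeExitingIterative_spec : Claim_equal_computeExitingIterative := by
  unfold Claim_equal_computeExitingIterative
  intro program _ hpre
  unfold Spec_computeExitingIterative
  unfold computeExitingIterative computeExitingIterative_alt
  rw [PySem.List.pyRange_zero_natCast]
  rw [PySem.List.foldl_append_singleton_eq_map, List.nil_append]
  simp only [List.foldl_map]
  set e0 : List (Option (Option Int)) :=
    (List.map (fun k => ((k : Nat) : Int)) (List.range program.length)).map
      (fun _ => (none : Option (Option Int))) with he0
  have hlen0 : e0.length = program.length := by simp [he0]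
  have hget0 : ∀ (j : Nat), j < program.length → e0[j]? = some none := by
    intro j hj
    simp [he0, hj]
  have hgood0 : GoodE program e0 := by
    intro j v hj
    rcases Nat.lt_or_ge j program.length with hlt | hge
    · rw [hget0 j hlt] at hj; exact absurd hj (by simp)
    · rw [List.getElem?_eq_none (by omega)] at hj; exact absurd hj (by simp)
  have hnp0 : ∀ (j : Nat), e0[j]? ≠ some (some none) := by
    intro j hj
    rcases Nat.lt_or_ge j program.length with hlt | hge
    · rw [hget0 j hlt] at hj; simp at hj
    · rw [List.getElem?_eq_none (by omega)] at hj; simp at hj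
  obtain ⟨flen, fgood, _, _, fdone⟩ :=
    outer_inv hpre program.length e0 hlen0 hgood0 hnp0
  set fin := (List.range program.length).foldl
    (fun e (i : Nat) => aWalk program e (i : Int) (program.length + 1)) e0 with hfin
  apply List.ext_getElem?
  intro j
  rcases Nat.lt_or_ge j program.length with hlt | hge
  · obtain ⟨v, hv⟩ := fdone j hlt hlt
    have hA : (fin.map
        (fun s => match s with | some (some v) => v | _ => 0))[j]? = some v := by
      rw [List.getElem?_map, hv]; rfl
    have hB : (((List.range program.length).map (fun k => ((k : Nat) : Int))).map
        (fun i => bWalk program PySem.Set.empty i (program.length + 1)))[j]? =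
        some (bWalk program PySem.Set.empty ((j : Nat) : Int) (program.length + 1)) := by
      simp [hlt]
    rw [hA, hB]
    have houtA : OutP program ((j : Nat) : Int) v := fgood j v hv
    have houtB : OutP program ((j : Nat) : Int)
        (bWalk program PySem.Set.empty ((j : Nat) : Int) (program.length + 1)) := by
      refine bWalk_out hpre (program.length + 1) [] ((j : Nat) : Int) List.nodup_nil
        (by intro v hv; simp at hv) (by positivity) (by simp)
    rw [OutP_func houtA houtB]
  · rw [List.getElem?_eq_none, List.getElem?_eq_none]
    · simpa using hge
    · simp only [List.length_map]; omega
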